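-- pv_equiv track=rewrite | github.com/itbc-bin/owe2a-afvinkopdracht3-Maartenvanvliet1997 | Afvinkopdracht 3.py | read_SEQ
-- ===== SOURCE A (Python) =====
-- def read_SEQ(file):
--     seq = []
--     codon = ''
--     start = False
--
--     for line in file[:30]:
--         line = line.rstrip().replace('N','')
--         for char in line.lower():
--             if len(codon) < 3:
--                 codon += char
--             elif len(codon) >= 3:
--                 if codon == 'ATG' and start == False:
--                     start = True
--                 else:
--                     seq.append(codon)
--                 codon = ''
--
--     return seq
-- ===== SOURCE B (Python) =====
-- def read_SEQ(file):
--     s = ''.join(line.rstrip().replace('N', '').lower() for line in file[:30])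
--     seq = []
--     i = 0
--     while i + 3 < len(s):
--         seq.append(s[i:i + 3])
--         i += 4
--     return seq
-- ===== Notes on version B (the rewrite author's own statement) =====
-- stated objective: simpler
-- what changed: Replaced A's per-character state machine (codon accumulator plus a dead 'ATG' start-flag branch that can never fire on lowercased text) with joining the processed first 30 lines into one string and emitting s[i:i+3] at stride 4 while i+3 < len(s).
import Mathlib
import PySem

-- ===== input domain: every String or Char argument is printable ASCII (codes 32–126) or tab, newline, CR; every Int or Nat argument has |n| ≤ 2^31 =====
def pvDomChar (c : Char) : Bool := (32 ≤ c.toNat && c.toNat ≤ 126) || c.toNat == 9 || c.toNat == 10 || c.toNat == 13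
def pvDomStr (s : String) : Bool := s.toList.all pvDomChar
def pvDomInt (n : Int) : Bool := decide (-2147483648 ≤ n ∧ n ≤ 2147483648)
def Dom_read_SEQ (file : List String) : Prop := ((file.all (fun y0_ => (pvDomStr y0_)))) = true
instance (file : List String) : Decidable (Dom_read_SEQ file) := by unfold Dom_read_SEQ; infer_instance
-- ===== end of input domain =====

-- B replaces A's per-character codon accumulator (with its dead 'ATG' start-flag branch)
-- by joining the processed first-30-lines into one string and slicing codons at stride 4: simpler, same cost.


-- ===== PORT A =====
-- state = (seq, codon, start); codon kept as List Char, codons converted to String when returned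
def readSeqStepA (st : List (List Char) × List Char × Bool) (char : Char) :
    List (List Char) × List Char × Bool :=
  if st.2.1.length < 3 then (st.1, st.2.1 ++ [char], st.2.2)
  else if st.2.1 = ['A', 'T', 'G'] ∧ st.2.2 = false then (st.1, [], true)
  else (st.1 ++ [st.2.1], [], st.2.2)

def read_SEQ (file : List String) : List String :=
  let fin := (PySem.List.slice file none (some 30)).foldl
    (fun st line =>
      let line := PySem.Str.replace (PySem.Str.rstrip line) "N" ""
      (PySem.Str.lower line).toList.foldl readSeqStepA st)
    ([], [], false)
  fin.1.map String.ofList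

-- ===== PORT B =====
-- the while loop of Source B: index i advances by 4, emits s[i:i+3] while i+3 < len(s)
-- (i is a Nat: in Source B i is a Python int that is always ≥ 0, so the slice lemma domain matches)
def readSeqChunks (s : List Char) (i : Nat) : List String :=
  if i + 3 < s.length then
    String.ofList (PySem.List.slice s (some (i : Int)) (some ((i : Int) + 3))) :: readSeqChunks s (i + 4)
  else []
termination_by s.length - i

def read_SEQ_alt (file : List String) : List String :=
  let s := PySem.Chars.join []
    ((PySem.List.slice file none (some 30)).map
      (fun line => (PySem.Str.lower (PySem.Str.replace (PySem.Str.rstrip line) "N" "")).toList))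
  readSeqChunks s 0

-- ===== PRECONDITION & SPEC =====
def Spec_read_SEQ (file : List String) (out : List String) : Prop := out = read_SEQ_alt file
instance (file : List String) (out : List String) : Decidable (Spec_read_SEQ file out) := by unfold Spec_read_SEQ; infer_instance

-- ===== CLAIM (what is proved, stated in full; the proofs are below) =====
def Claim_equal_read_SEQ : Prop := ∀ (file : List String), Dom_read_SEQ file → Spec_read_SEQ file (read_SEQ file)

-- ===== LEMMAS AND PROOFS =====

-- the common codon extraction both programs compute: keep 3 chars, drop the 4th
def pvCodons : List Char → List (List Char)
  | a :: b :: c :: _ :: t => [a, b, c] :: pvCodons t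
  | _ => []

theorem pvLowerChar_ne_A (c : Char) : PySem.Chars.lowerChar c ≠ 'A' := by
  simp only [PySem.Chars.lowerChar, PySem.Chars.isupper]
  split
  · rename_i h
    simp only [Bool.and_eq_true, decide_eq_true_eq, Char.le_def] at h
    have h1 : 65 ≤ c.toNat := h.1
    have h2 : c.toNat ≤ 90 := h.2
    intro he
    have hv : (c.toNat + 32).isValidChar := Or.inl (by omega)
    have : (Char.ofNat (c.toNat + 32)).toNat = 'A'.toNat := congrArg Char.toNat he
    rw [Char.toNat_ofNat, if_pos hv] at this
    have hA65 : 'A'.toNat = 65 := rfl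
    rw [hA65] at this
    omega
  · rename_i h
    simp only [Bool.and_eq_true, decide_eq_true_eq, Char.le_def] at h
    intro he; subst he; simp at h

theorem pvJoin_nil_eq_flatten (cs : List (List Char)) : PySem.Chars.join [] cs = cs.flatten := by
  simp only [PySem.Chars.join, List.intercalate]
  induction cs with
  | nil => rfl
  | cons h t ih => cases t <;> simp_all [List.intersperse]

-- A's char fold starting from an empty codon produces exactly pvCodons,
-- provided no character of the stream is 'A' (so the dead 'ATG' branch never fires)
theorem pvFoldA_eq_codons (S : List Char) (hA : ∀ c ∈ S, c ≠ 'A') :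
    ∀ (seq : List (List Char)) (st : Bool),
      (S.foldl readSeqStepA (seq, [], st)).1 = seq ++ pvCodons S := by
  induction S using pvCodons.induct with
  | case1 a b c d t ih =>
    intro seq st
    have ha : a ≠ 'A' := hA a (by simp)
    simp only [List.foldl_cons]
    have s1 : readSeqStepA (seq, [], st) a = (seq, [a], st) := by simp [readSeqStepA]
    have s2 : readSeqStepA (seq, [a], st) b = (seq, [a, b], st) := by simp [readSeqStepA]
    have s3 : readSeqStepA (seq, [a, b], st) c = (seq, [a, b, c], st) := by simp [readSeqStepA]
    have s4 : readSeqStepA (seq, [a, b, c], st) d = (seq ++ [[a, b, c]], [], st) := by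
      simp only [readSeqStepA]
      rw [if_neg (by simp), if_neg (by rintro ⟨h1, -⟩; exact ha (by injection h1))]
    rw [s1, s2, s3, s4, ih (fun x hx => hA x (by simp [hx])) (seq ++ [[a, b, c]]) st]
    simp [pvCodons]
  | case2 x hx =>
    intro seq st
    match x, hx with
    | [], _ => simp [pvCodons]
    | [a], _ => simp [pvCodons, readSeqStepA]
    | [a, b], _ => simp [pvCodons, readSeqStepA]
    | [a, b, c], _ => simp [pvCodons, readSeqStepA]
    | a :: b :: c :: d :: t, hx => exact absurd rfl (hx a b c d t)

-- B's stride-4 while loop computes pvCodons of the tail from index i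
theorem pvChunks_eq_codons (s : List Char) (i : Nat) :
    readSeqChunks s i = (pvCodons (s.drop i)).map String.ofList := by
  induction i using readSeqChunks.induct (s := s) with
  | case1 i h ih =>
    rw [readSeqChunks, if_pos h]
    have hlt : i + 3 < s.length := h
    obtain ⟨a, b, c, d, t, hd⟩ :
        ∃ a b c d t, s.drop i = a :: b :: c :: d :: t := by
      have hlen : 4 ≤ (s.drop i).length := by simp [List.length_drop]; omega
      match hdi : s.drop i with
      | a :: b :: c :: d :: t => exact ⟨a, b, c, d, t, rfl⟩
      | [] | [_] | [_, _] | [_, _, _] => rw [hdi] at hlen; simp at hlen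
    have hslice : PySem.List.slice s (some (i : Int)) (some ((i : Int) + 3)) = [a, b, c] := by
      have := PySem.List.slice_natCast_add (xs := s) (j := i) (n := 3)
      push_cast at this
      rw [this, hd]
      rfl
    have hdrop : s.drop (i + 4) = t := by
      have : s.drop (i + 4) = (s.drop i).drop 4 := by rw [List.drop_drop]
      rw [this, hd]; rfl
    rw [hslice, ih, hdrop, hd]
    simp [pvCodons]
  | case2 i h =>
    rw [readSeqChunks, if_neg h]
    have : pvCodons (s.drop i) = [] := by
      have hlen : (s.drop i).length ≤ 3 := by simp [List.length_drop]; omega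
      match hdi : s.drop i with
      | [] | [_] | [_, _] | [_, _, _] => simp [pvCodons]
      | a :: b :: c :: d :: t => rw [hdi] at hlen; simp at hlen; omega
    rw [this]; rfl

-- ===== VERDICT (by name: the statement is the Claim_ definition above) =====
theorem read_SEQ_spec : Claim_equal_read_SEQ := by
  intro file _
  unfold Spec_read_SEQ read_SEQ read_SEQ_alt
  rw [pvJoin_nil_eq_flatten, pvChunks_eq_codons, List.drop_zero]
  set L := (PySem.List.slice file none (some 30)).map
      (fun line => (PySem.Str.lower (PySem.Str.replace (PySem.Str.rstrip line) "N" "")).toList) with hL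
  have hnest :
      (PySem.List.slice file none (some 30)).foldl
        (fun st line =>
          ((PySem.Str.lower (PySem.Str.replace (PySem.Str.rstrip line) "N" "")).toList).foldl
            readSeqStepA st)
        (([], [], false) : List (List Char) × List Char × Bool)
      = L.flatten.foldl readSeqStepA ([], [], false) := by
    rw [List.foldl_flatten, hL, List.foldl_map]
  simp only [hnest]
  have hA : ∀ c ∈ L.flatten, c ≠ 'A' := by
    intro c hc
    rw [List.mem_flatten] at hc
    obtain ⟨l, hl, hcl⟩ := hc
    rw [hL, List.mem_map] at hl
    obtain ⟨line, -, rfl⟩ := hl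
    rw [PySem.Str.toList_lower, PySem.Chars.lower, List.mem_map] at hcl
    obtain ⟨x, -, rfl⟩ := hcl
    exact pvLowerChar_ne_A x
  rw [pvFoldA_eq_codons L.flatten hA]
  simp
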